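-- pv_equiv track=rewrite | github.com/uDALES/u-dales | tools/compare_preprocessing.py | _phase_statuses
-- ===== SOURCE A (Python) =====
-- from typing import List, Optional
--
-- PHASE_OUTPUTS = [
--     ("Grid", ["lscale.inp.{case}", "prof.inp.{case}"]),
--     (
--         "IBM",
--         [
--             "factypes.inp.{case}",
--             "facets.inp.{case}",
--             "facetarea.inp.{case}",
--             "solid_c.txt",
--             "solid_u.txt",
--             "solid_v.txt",
--             "solid_w.txt",
--             "fluid_boundary_c.txt",
--             "fluid_boundary_u.txt",
--             "fluid_boundary_v.txt",
--             "fluid_boundary_w.txt",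
--             "facet_sections_c.txt",
--             "facet_sections_u.txt",
--             "facet_sections_v.txt",
--             "facet_sections_w.txt",
--         ],
--     ),
--     ("View factors", ["svf.inp.{case}", "vfsparse.inp.{case}"]),
--     ("Direct shortwave", ["netsw.inp.{case}"]),
--     ("SEB init", ["Tfacinit.inp.{case}"]),
--     ("Vegetation", ["veg.inp.{case}", "veg_params.inp.{case}"]),
-- ]
--
-- def _phase_statuses(case: str, outputs: List[str], compare_statuses: dict) -> List[tuple]:
--     output_set = set(outputs)
--     rows = []
--     for phase, patterns in PHASE_OUTPUTS:
--         relpaths = [pattern.format(case=case) for pattern in patterns if pattern.format(case=case) in output_set]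
--         if not relpaths:
--             rows.append((phase, "n/a", "No phase outputs for this case"))
--             continue
--         states = [compare_statuses.get(relpath, "unknown") for relpath in relpaths]
--         if all(state == "match" for state in states):
--             rows.append((phase, "OK", ", ".join(relpaths)))
--         elif any(state == "mismatch" for state in states):
--             rows.append((phase, "Mismatch", ", ".join(relpath for relpath in relpaths if compare_statuses.get(relpath) == "mismatch")))
--         elif any(state.startswith("missing") for state in states):
--             rows.append((phase, "Missing", ", ".join(relpath for relpath in relpaths if compare_statuses.get(relpath, "").startswith("missing"))))
--         elif any(state == "shape_mismatch" for state in states):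
--             rows.append((phase, "Shape mismatch", ", ".join(relpath for relpath in relpaths if compare_statuses.get(relpath) == "shape_mismatch")))
--         else:
--             rows.append((phase, "Unknown", ", ".join(relpaths)))
--     return rows
-- ===== SOURCE B (Python) =====
-- from typing import List
--
-- PHASE_OUTPUTS = [
--     ("Grid", ["lscale.inp.{case}", "prof.inp.{case}"]),
--     (
--         "IBM",
--         [
--             "factypes.inp.{case}",
--             "facets.inp.{case}",
--             "facetarea.inp.{case}",
--             "solid_c.txt",
--             "solid_u.txt",
--             "solid_v.txt",
--             "solid_w.txt",
--             "fluid_boundary_c.txt",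
--             "fluid_boundary_u.txt",
--             "fluid_boundary_v.txt",
--             "fluid_boundary_w.txt",
--             "facet_sections_c.txt",
--             "facet_sections_u.txt",
--             "facet_sections_v.txt",
--             "facet_sections_w.txt",
--         ],
--     ),
--     ("View factors", ["svf.inp.{case}", "vfsparse.inp.{case}"]),
--     ("Direct shortwave", ["netsw.inp.{case}"]),
--     ("SEB init", ["Tfacinit.inp.{case}"]),
--     ("Vegetation", ["veg.inp.{case}", "veg_params.inp.{case}"]),
-- ]
--
--
-- def _phase_statuses(case: str, outputs: List[str], compare_statuses: dict) -> List[tuple]: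
--     # Single classification pass into priority buckets instead of re-scanning
--     # the relpaths with all/any + a filtering generator in every branch.
--     output_set = set(outputs)
--     rows = []
--     for phase, patterns in PHASE_OUTPUTS:
--         relpaths = [pattern.format(case=case) for pattern in patterns if pattern.format(case=case) in output_set]
--         if not relpaths:
--             rows.append((phase, "n/a", "No phase outputs for this case"))
--             continue
--         matches, mismatches, missings, shapes = [], [], [], []
--         for relpath in relpaths:
--             state = compare_statuses.get(relpath, "unknown")
--             if state == "match":
--                 matches.append(relpath)
--             elif state == "mismatch":
--                 mismatches.append(relpath)
--             elif state.startswith("missing"):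
--                 missings.append(relpath)
--             elif state == "shape_mismatch":
--                 shapes.append(relpath)
--         if len(matches) == len(relpaths):
--             rows.append((phase, "OK", ", ".join(relpaths)))
--         elif mismatches:
--             rows.append((phase, "Mismatch", ", ".join(mismatches)))
--         elif missings:
--             rows.append((phase, "Missing", ", ".join(missings)))
--         elif shapes:
--             rows.append((phase, "Shape mismatch", ", ".join(shapes)))
--         else:
--             rows.append((phase, "Unknown", ", ".join(relpaths)))
--     return rows
-- ===== Notes on version B (the rewrite author's own statement) =====
-- stated objective: simpler
-- what changed: One classification pass sorts each relpath into priority buckets (match/mismatch/missing/shape), then the row is picked from the buckets, replacing A's per-branch all/any scans plus a separate filtering generator in every branch.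
import Mathlib
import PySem

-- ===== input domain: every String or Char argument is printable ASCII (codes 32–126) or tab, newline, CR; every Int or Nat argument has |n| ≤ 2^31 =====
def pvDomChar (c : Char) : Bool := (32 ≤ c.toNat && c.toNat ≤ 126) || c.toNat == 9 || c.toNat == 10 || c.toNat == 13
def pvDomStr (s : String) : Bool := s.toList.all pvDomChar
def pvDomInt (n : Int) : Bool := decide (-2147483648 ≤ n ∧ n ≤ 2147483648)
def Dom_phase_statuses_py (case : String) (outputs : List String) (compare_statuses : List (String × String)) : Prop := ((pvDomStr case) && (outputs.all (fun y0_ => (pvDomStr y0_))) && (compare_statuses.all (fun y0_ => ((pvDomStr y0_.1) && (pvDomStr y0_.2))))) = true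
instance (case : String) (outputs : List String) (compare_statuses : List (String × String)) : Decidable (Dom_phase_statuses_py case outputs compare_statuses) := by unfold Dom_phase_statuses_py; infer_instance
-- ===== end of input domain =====

-- B buckets each relpath once by status and then picks the row from the buckets,
-- instead of A's per-branch all/any scans plus a filtering generator in every branch.

-- shared module constant PHASE_OUTPUTS and 'pattern.format(case=case)'
-- (patterns are literals whose only placeholder is {case}, so format = replace; exact)
def pvFmt (pat case : String) : String := PySem.Str.replace pat "{case}" case

def pvPhaseOutputs : List (String × List String) :=
  [("Grid", ["lscale.inp.{case}", "prof.inp.{case}"]),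
   ("IBM", ["factypes.inp.{case}", "facets.inp.{case}", "facetarea.inp.{case}",
            "solid_c.txt", "solid_u.txt", "solid_v.txt", "solid_w.txt",
            "fluid_boundary_c.txt", "fluid_boundary_u.txt", "fluid_boundary_v.txt",
            "fluid_boundary_w.txt", "facet_sections_c.txt", "facet_sections_u.txt",
            "facet_sections_v.txt", "facet_sections_w.txt"]),
   ("View factors", ["svf.inp.{case}", "vfsparse.inp.{case}"]),
   ("Direct shortwave", ["netsw.inp.{case}"]),
   ("SEB init", ["Tfacinit.inp.{case}"]),
   ("Vegetation", ["veg.inp.{case}", "veg_params.inp.{case}"])]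

-- ===== PORT A =====
-- loop body of A (one phase): per-branch all/any over the states list, and a fresh
-- filtering pass over relpaths inside each branch, exactly as in the Python
def pvRowA (phase : String) (relpaths : List String) (d : PySem.Dict String String) :
    String × String × String :=
  if relpaths = [] then (phase, "n/a", "No phase outputs for this case")
  else
    let states := relpaths.map (fun rp => d.getD rp "unknown")
    if states.all (fun s => s == "match") then
      (phase, "OK", PySem.Str.join ", " relpaths)
    else if states.any (fun s => s == "mismatch") then
      (phase, "Mismatch", PySem.Str.join ", "
        (relpaths.filter (fun rp => d.get? rp == some "mismatch")))
    else if states.any (fun s => PySem.Str.startswith s "missing") then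
      (phase, "Missing", PySem.Str.join ", "
        (relpaths.filter (fun rp => PySem.Str.startswith (d.getD rp "") "missing")))
    else if states.any (fun s => s == "shape_mismatch") then
      (phase, "Shape mismatch", PySem.Str.join ", "
        (relpaths.filter (fun rp => d.get? rp == some "shape_mismatch")))
    else (phase, "Unknown", PySem.Str.join ", " relpaths)

def phase_statuses_py (case : String) (outputs : List String) (compare_statuses : List (String × String)) : List (String × String × String) :=
  let output_set : PySem.Set String := PySem.Set.ofList outputs
  let d : PySem.Dict String String := PySem.Dict.mk compare_statuses
  pvPhaseOutputs.foldl (fun rows pp =>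
    let relpaths := (pp.2.filter (fun p => PySem.Set.contains output_set (pvFmt p case))).map
      (fun p => pvFmt p case)
    rows ++ [pvRowA pp.1 relpaths d]) []

-- ===== PORT B =====
-- classification step of B: one relpath into one of the four buckets (or none)
def pvStepB (d : PySem.Dict String String)
    (b : List String × List String × List String × List String) (rp : String) :
    List String × List String × List String × List String :=
  let s := d.getD rp "unknown"
  if s == "match" then (b.1 ++ [rp], b.2.1, b.2.2.1, b.2.2.2)
  else if s == "mismatch" then (b.1, b.2.1 ++ [rp], b.2.2.1, b.2.2.2)
  else if PySem.Str.startswith s "missing" then (b.1, b.2.1, b.2.2.1 ++ [rp], b.2.2.2)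
  else if s == "shape_mismatch" then (b.1, b.2.1, b.2.2.1, b.2.2.2 ++ [rp])
  else b

-- loop body of B (one phase): single bucketing pass, then pick the row from the buckets
def pvRowB (phase : String) (relpaths : List String) (d : PySem.Dict String String) :
    String × String × String :=
  if relpaths = [] then (phase, "n/a", "No phase outputs for this case")
  else
    let b := relpaths.foldl (pvStepB d) ([], [], [], [])
    if b.1.length == relpaths.length then (phase, "OK", PySem.Str.join ", " relpaths)
    else if !b.2.1.isEmpty then (phase, "Mismatch", PySem.Str.join ", " b.2.1)
    else if !b.2.2.1.isEmpty then (phase, "Missing", PySem.Str.join ", " b.2.2.1)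
    else if !b.2.2.2.isEmpty then (phase, "Shape mismatch", PySem.Str.join ", " b.2.2.2)
    else (phase, "Unknown", PySem.Str.join ", " relpaths)

def phase_statuses_py_alt (case : String) (outputs : List String) (compare_statuses : List (String × String)) : List (String × String × String) :=
  let output_set : PySem.Set String := PySem.Set.ofList outputs
  let d : PySem.Dict String String := PySem.Dict.mk compare_statuses
  pvPhaseOutputs.foldl (fun rows pp =>
    let relpaths := (pp.2.filter (fun p => PySem.Set.contains output_set (pvFmt p case))).map
      (fun p => pvFmt p case)
    rows ++ [pvRowB pp.1 relpaths d]) []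

-- ===== PRECONDITION & SPEC =====
def Spec_phase_statuses_py (case : String) (outputs : List String) (compare_statuses : List (String × String)) (out : List (String × String × String)) : Prop := out = phase_statuses_py_alt case outputs compare_statuses
instance (case : String) (outputs : List String) (compare_statuses : List (String × String)) (out : List (String × String × String)) : Decidable (Spec_phase_statuses_py case outputs compare_statuses out) := by unfold Spec_phase_statuses_py; infer_instance

-- ===== CLAIM (what is proved, stated in full; the proofs are below) =====
def Claim_equal_phase_statuses_py : Prop := ∀ (case : String) (outputs : List String) (compare_statuses : List (String × String)), Dom_phase_statuses_py case outputs compare_statuses → Spec_phase_statuses_py case outputs compare_statuses (phase_statuses_py case outputs compare_statuses)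

-- ===== LEMMAS AND PROOFS =====
-- the four classification predicates, as A's branches test them
def pvC1 (d : PySem.Dict String String) (rp : String) : Bool := d.getD rp "unknown" == "match"
def pvC2 (d : PySem.Dict String String) (rp : String) : Bool := d.getD rp "unknown" == "mismatch"
def pvC3 (d : PySem.Dict String String) (rp : String) : Bool :=
  PySem.Str.startswith (d.getD rp "unknown") "missing"
def pvC4 (d : PySem.Dict String String) (rp : String) : Bool :=
  d.getD rp "unknown" == "shape_mismatch"

-- B's fold computes the four filters (sequential branch conditions collapse to the
-- plain predicates because the four status classes are mutually exclusive)
theorem pvBuckets (d : PySem.Dict String String) (l : List String)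
    (a b c e : List String) :
    l.foldl (pvStepB d) (a, b, c, e) =
      (a ++ l.filter (pvC1 d), b ++ l.filter (pvC2 d),
       c ++ l.filter (pvC3 d), e ++ l.filter (pvC4 d)) := by
  have w1 : PySem.Chars.startswith ['m','a','t','c','h'] ['m','i','s','s','i','n','g'] = false := by decide
  have w2 : PySem.Chars.startswith ['m','i','s','m','a','t','c','h'] ['m','i','s','s','i','n','g'] = false := by decide
  have w4 : PySem.Chars.startswith ['s','h','a','p','e','_','m','i','s','m','a','t','c','h'] ['m','i','s','s','i','n','g'] = false := by decide
  induction l generalizing a b c e with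
  | nil => simp
  | cons rp t ih =>
    by_cases h1 : d.getD rp "unknown" = "match"
    · simp [pvStepB, pvC1, pvC2, pvC3, pvC4, h1, w1, ih]
    · by_cases h2 : d.getD rp "unknown" = "mismatch"
      · simp [pvStepB, pvC1, pvC2, pvC3, pvC4, h2, w2, ih]
      · by_cases h3 : PySem.Str.startswith (d.getD rp "unknown") "missing" = true
        · have h4 : d.getD rp "unknown" ≠ "shape_mismatch" := by
            intro he; rw [he] at h3; exact absurd h3 (by decide)
          have h3' : PySem.Chars.startswith (d.getD rp "unknown").toList ['m','i','s','s','i','n','g'] = true := by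
            simpa using h3
          simp [pvStepB, pvC1, pvC2, pvC3, pvC4, h1, h2, h3', h4, ih]
        · have h3' : PySem.Chars.startswith (d.getD rp "unknown").toList ['m','i','s','s','i','n','g'] = false := by
            simpa using h3
          by_cases h4 : d.getD rp "unknown" = "shape_mismatch"
          · simp [pvStepB, pvC1, pvC2, pvC3, pvC4, h4, w4, ih]
          · simp [pvStepB, pvC1, pvC2, pvC3, pvC4, h1, h2, h3', h4, ih]

-- Bool bridges between A's all/any tests and B's bucket tests
theorem pvAllFilter (l : List String) (p : String → Bool) :
    l.all p = ((l.filter p).length == l.length) := by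
  by_cases h : ∀ x ∈ l, p x = true
  · rw [(List.length_filter_eq_length_iff).mpr h]
    simpa [List.all_eq_true] using h
  · have h2 : ((l.filter p).length == l.length) = false := by
      simp only [beq_eq_false_iff_ne]
      intro he; exact h ((List.length_filter_eq_length_iff).mp he)
    rw [h2]
    simpa [List.all_eq_true] using h

theorem pvAnyFilter (l : List String) (p : String → Bool) :
    l.any p = !(l.filter p).isEmpty := by
  induction l with
  | nil => rfl
  | cons h t ih => by_cases hp : p h = true <;> simp [hp, ih]

-- A's branch-local filters coincide with the classification predicates
theorem pvFilter2 (d : PySem.Dict String String) (l : List String) :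
    l.filter (fun rp => d.get? rp == some "mismatch") = l.filter (pvC2 d) := by
  apply List.filter_congr; intro rp _
  unfold pvC2; rw [PySem.Dict.getD_eq_get?_getD]
  cases d.get? rp <;> simp

theorem pvFilter3 (d : PySem.Dict String String) (l : List String) :
    l.filter (fun rp => PySem.Str.startswith (d.getD rp "") "missing") = l.filter (pvC3 d) := by
  apply List.filter_congr; intro rp _
  unfold pvC3; rw [PySem.Dict.getD_eq_get?_getD, PySem.Dict.getD_eq_get?_getD]
  cases d.get? rp <;> simp <;> decide

theorem pvFilter4 (d : PySem.Dict String String) (l : List String) :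
    l.filter (fun rp => d.get? rp == some "shape_mismatch") = l.filter (pvC4 d) := by
  apply List.filter_congr; intro rp _
  unfold pvC4; rw [PySem.Dict.getD_eq_get?_getD]
  cases d.get? rp <;> simp

-- per-phase rows agree
theorem pvRow_eq (phase : String) (relpaths : List String) (d : PySem.Dict String String) :
    pvRowA phase relpaths d = pvRowB phase relpaths d := by
  by_cases hnil : relpaths = []
  · simp [pvRowA, pvRowB, hnil]
  · have e1 : ((fun s => s == "match") ∘ fun rp => d.getD rp "unknown") = pvC1 d := by
      funext rp; rfl
    have e2 : ((fun s => s == "mismatch") ∘ fun rp => d.getD rp "unknown") = pvC2 d := by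
      funext rp; rfl
    have e3 : ((fun s => PySem.Str.startswith s "missing") ∘ fun rp => d.getD rp "unknown") = pvC3 d := by
      funext rp; rfl
    have e4 : ((fun s => s == "shape_mismatch") ∘ fun rp => d.getD rp "unknown") = pvC4 d := by
      funext rp; rfl
    unfold pvRowA pvRowB
    simp only [if_neg hnil, pvBuckets, List.nil_append, List.all_map, List.any_map,
      e1, e2, e3, e4, pvAllFilter, pvAnyFilter, pvFilter2, pvFilter3, pvFilter4]

-- ===== VERDICT (by name: the statement is the Claim_ definition above) =====
theorem phase_statuses_py_spec : Claim_equal_phase_statuses_py := by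
  intro case outputs compare_statuses _
  unfold Spec_phase_statuses_py phase_statuses_py phase_statuses_py_alt
  simp only [pvRow_eq]
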